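-- pv_equiv track=rewrite | github.com/nbso13/ems_for_rhythm_learning | scripts/ems_test_pre_processing.py | count_intervals
-- ===== SOURCE A (Python) =====
-- def count_intervals(rhyth_string):
--     zero_counter = 0
--     intervs = []
--     for i in range(len(rhyth_string)):
--         if rhyth_string[i] == '0':
--             zero_counter += 1 # add to interval
--         if rhyth_string[i] == '1':
--             intervs.append(zero_counter) # save interval
--             zero_counter = 0 # reset counter
--     if zero_counter == len(rhyth_string): # no intervals, empty string
--         unique_intervals = []
--         num_unique = 0
--         return intervs, unique_intervals, num_unique
--     intervs[0] += zero_counter # add trailing zeros to first measured interval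
--     unique_intervals = list(set(intervs))
--     num_unique = len(unique_intervals)
--     return intervs, unique_intervals, num_unique
-- ===== SOURCE B (Python) =====
-- def count_intervals(rhyth_string):
--     if rhyth_string.count('0') == len(rhyth_string):
--         return [], [], 0
--     parts = rhyth_string.split('1')
--     intervs = [p.count('0') for p in parts[:-1]]
--     intervs[0] += parts[-1].count('0')
--     unique_intervals = sorted(set(intervs))
--     return intervs, unique_intervals, len(unique_intervals)
-- ===== Notes on version B (the rewrite author's own statement) =====
-- stated objective: idiomatic
-- what changed: Replaces A's per-character loop with a manually reset zero counter by whole-string passes: a count/len guard for the all-zeros case, a split at the one-marks plus a per-segment zero count for the intervals, the same trailing fixup, and sorted(set(...)) for the unique list.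
-- outside the precondition, e.g. on count_intervals('0000000011'): A returns ([8, 0], [8, 0], 2), B returns ([8, 0], [0, 8], 2); on count_intervals('02'): A raises IndexError, B raises IndexError
import Mathlib
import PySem

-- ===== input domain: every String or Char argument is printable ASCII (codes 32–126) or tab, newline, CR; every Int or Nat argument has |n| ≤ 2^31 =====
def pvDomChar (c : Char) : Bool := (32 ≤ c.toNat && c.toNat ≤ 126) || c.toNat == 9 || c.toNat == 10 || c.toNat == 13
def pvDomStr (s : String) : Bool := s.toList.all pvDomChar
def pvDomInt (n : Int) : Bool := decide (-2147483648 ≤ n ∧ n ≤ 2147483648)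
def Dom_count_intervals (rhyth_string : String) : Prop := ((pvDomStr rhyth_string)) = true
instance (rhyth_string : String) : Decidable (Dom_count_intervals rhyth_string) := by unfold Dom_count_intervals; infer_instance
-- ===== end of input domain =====

-- B replaces A's per-character loop by whole-string split/count passes and sorted(set(...)); proved
-- equal to A on Pre_ (which excludes A's IndexError inputs and the zero-runs of length at least 8 on which the order
-- of A's list(set(...)) is CPython hash-table order).

-- Hand port of `list(set(xs))` for a list of NONNEGATIVE ints all < 8 (the regime Pre_ admits):
-- there CPython's set places each int v in slot v of its table (hash(v) = v, no collisions before
-- or after growth), so iteration order is ascending and list(set(xs)) is the sorted distinct list.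
-- Exact on that regime only; Pre_ excludes the rest.
def pyListSet (xs : List Int) : List Int :=
  PySem.List.sorted (PySem.Set.ofList xs) (fun x => x) false

-- ===== PORT A =====
-- the loop body of A's for-loop (zero_counter, intervs as the state)
def pvStep (st : Int × List Int) (c : Char) : Int × List Int :=
  let z := if c = '0' then st.1 + 1 else st.1
  if c = '1' then (0, st.2 ++ [z]) else (z, st.2)

def count_intervals (rhyth_string : String) : List Int × List Int × Int :=
  let cs := rhyth_string.toList
  let st := cs.foldl pvStep (0, [])
  if st.1 = (PySem.Chars.len cs : Int) then (st.2, [], 0)    -- no intervals, empty string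
  else
    match st.2 with
    | [] => ([], [], 0)     -- Python raises IndexError on intervs[0]; excluded by Pre_
    | i0 :: rest =>
      let intervs := (i0 + st.1) :: rest                      -- trailing zeros into the first interval
      let unique := pyListSet intervs                         -- list(set(intervs)), exact on Pre_
      (intervs, unique, (unique.length : Int))

-- ===== PORT B =====
def count_intervals_alt (rhyth_string : String) : List Int × List Int × Int :=
  let cs := rhyth_string.toList
  if PySem.Chars.count cs ['0'] = PySem.Chars.len cs then ([], [], 0)
  else
    let parts := PySem.Chars.splitOn cs ['1']
    match parts.dropLast.map (fun p => (PySem.Chars.count p ['0'] : Int)) with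
    | [] => ([], [], 0)     -- Python raises IndexError on intervs[0]; excluded by Pre_
    | i0 :: rest =>
      let intervs := (i0 + (PySem.Chars.count (parts.getLastD []) ['0'] : Int)) :: rest
      let unique := pyListSet intervs                         -- sorted(set(intervs))
      (intervs, unique, (unique.length : Int))

-- ===== PRECONDITION & SPEC =====
-- Pre_ excludes (a) strings with no one-mark that are not made of zero characters only — there BOTH Pythons raise IndexError on
-- intervs[0] — and (b) strings producing an interval of at least 8 zeros (a segment between one-marks counting 8 or
-- more zero characters, or first+last segments doing so together), where the order of A's list(set(...)) is an accident of
-- CPython's hash table and B's sorted order is as defensible.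
def Pre_count_intervals (rhyth_string : String) : Prop :=
  rhyth_string.toList.all (· = '0') = true ∨
  ('1' ∈ rhyth_string.toList ∧
    (∀ p ∈ (PySem.Chars.splitOn rhyth_string.toList ['1']).dropLast, p.count '0' < 8) ∧
    ((PySem.Chars.splitOn rhyth_string.toList ['1']).headD []).count '0'
      + ((PySem.Chars.splitOn rhyth_string.toList ['1']).getLastD []).count '0' < 8)
instance (rhyth_string : String) : Decidable (Pre_count_intervals rhyth_string) := by
  unfold Pre_count_intervals; infer_instance

def pvWitness_count_intervals : String := "0010010"

def Spec_count_intervals (rhyth_string : String) (out : List Int × List Int × Int) : Prop := out = count_intervals_alt rhyth_string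
instance (rhyth_string : String) (out : List Int × List Int × Int) : Decidable (Spec_count_intervals rhyth_string out) := by unfold Spec_count_intervals; infer_instance

-- ===== CLAIM (what is proved, stated in full; the proofs are below) =====
def Claim_equal_count_intervals : Prop := ∀ (rhyth_string : String), Dom_count_intervals rhyth_string → Pre_count_intervals rhyth_string → Spec_count_intervals rhyth_string (count_intervals rhyth_string)

-- ===== LEMMAS AND PROOFS =====

-- zeros-in-a-part, as the Int both ports put into intervs
def pvC0 (p : List Char) : Int := (p.count '0' : Int)

-- structural form of s.split('1') with the accumulators of PySem.Chars.splitOn.go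
def pvSplit : List Char → List Char → List (List Char) → List (List Char)
  | [], cur, acc => (cur.reverse :: acc).reverse
  | c :: rest, cur, acc =>
    if c = '1' then pvSplit rest [] (cur.reverse :: acc) else pvSplit rest (c :: cur) acc

def pvConsHead (x : List Char) : List (List Char) → List (List Char)
  | [] => [x]
  | p :: ps => (x ++ p) :: ps

lemma pvCountGo_single (c : Char) : ∀ (fuel : Nat) (l : List Char) (acc : Nat),
    l.length ≤ fuel → PySem.Chars.count.go [c] fuel l acc = acc + l.count c := by
  intro fuel
  induction fuel with
  | zero =>
    intro l acc h
    interval_cases h' : l.length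
    · simp at h' ⊢; simp [h', PySem.Chars.count.go]
    all_goals simp_all
  | succ fuel ih =>
    intro l acc h
    match l with
    | [] => simp [PySem.Chars.count.go]
    | a :: t =>
      simp only [PySem.Chars.count.go]
      by_cases hca : c = a
      · subst hca
        simp [List.isPrefixOf, ih t (acc+1) (by simpa using Nat.lt_succ_iff.mp (by simpa using h)), List.count_cons]
        omega
      · simp [List.isPrefixOf, hca, ih t acc (by simpa using Nat.lt_succ_iff.mp (by simpa using h)), List.count_cons, Ne.symm hca]


lemma pvCount_single (l : List Char) (c : Char) : PySem.Chars.count l [c] = l.count c := by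
  simp only [PySem.Chars.count, List.isEmpty_cons, Bool.false_eq_true, if_false, if_neg]
  simpa using pvCountGo_single c l.length l 0 le_rfl


lemma pvSplit_acc : ∀ (l : List Char) (cur : List Char) (acc : List (List Char)),
    pvSplit l cur acc = acc.reverse ++ pvSplit l cur [] := by
  intro l
  induction l with
  | nil => intro cur acc; simp [pvSplit]
  | cons c rest ih =>
    intro cur acc
    by_cases hc : c = '1'
    · simp only [pvSplit, hc, if_pos rfl]
      rw [ih [] (cur.reverse :: acc), ih [] [cur.reverse]]
      simp
    · simp only [pvSplit, hc, if_neg hc]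
      exact ih (c :: cur) acc


lemma pvSplit_cur : ∀ (l : List Char) (cur : List Char),
    pvSplit l cur [] = pvConsHead cur.reverse (pvSplit l [] []) := by
  intro l
  induction l with
  | nil => intro cur; simp [pvSplit, pvConsHead]
  | cons c rest ih =>
    intro cur
    by_cases hc : c = '1'
    · simp only [pvSplit, hc, if_pos rfl]
      rw [pvSplit_acc rest [] [cur.reverse], pvSplit_acc rest [] [List.reverse []]]
      simp [pvConsHead]
    · simp only [pvSplit, if_neg hc]
      rw [ih (c :: cur), ih [c]]
      rcases h : pvSplit rest [] [] with _ | ⟨p, ps⟩ <;> simp [pvConsHead]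


lemma pvSplitGo_eq : ∀ (fuel : Nat) (l cur : List Char) (acc : List (List Char)),
    l.length < fuel → PySem.Chars.splitOn.go ['1'] fuel l cur acc = pvSplit l cur acc := by
  intro fuel
  induction fuel with
  | zero => intro l cur acc h; omega
  | succ fuel ih =>
    intro l cur acc h
    match l with
    | [] => simp [PySem.Chars.splitOn.go, pvSplit]
    | c :: rest =>
      by_cases hc : c = '1'
      · subst hc
        simp only [PySem.Chars.splitOn.go, pvSplit, List.isPrefixOf, if_pos rfl]
        simpa using ih rest [] (cur.reverse :: acc) (by simpa using Nat.lt_succ_iff.mp (by simpa using h))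
      · simp only [PySem.Chars.splitOn.go, pvSplit, List.isPrefixOf]
        have hbc : ('1' == c) = false := by simpa using Ne.symm hc
        simp only [hbc, Bool.false_and, Bool.false_eq_true, if_false, if_neg hc]
        exact ih rest (c :: cur) acc (by simp at h ⊢; omega)


lemma pvSplitOn_eq (l : List Char) : PySem.Chars.splitOn l ['1'] = pvSplit l [] [] := by
  simpa [PySem.Chars.splitOn] using pvSplitGo_eq (l.length + 1) l [] [] (by omega)


lemma pvSplit_length : ∀ (l : List Char) (cur : List Char) (acc : List (List Char)),
    (pvSplit l cur acc).length = acc.length + 1 + l.count '1' := by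
  intro l
  induction l with
  | nil => intro cur acc; simp [pvSplit]
  | cons c rest ih =>
    intro cur acc
    by_cases hc : c = '1'
    · subst hc; simp [pvSplit, ih, List.count_cons]; omega
    · simp [pvSplit, if_neg hc, ih, List.count_cons, Ne.symm hc]


lemma pvFold_all_zeros : ∀ (l : List Char) (z : Int) (iv : List Int),
    (∀ c ∈ l, c = '0') → l.foldl pvStep (z, iv) = (z + l.length, iv) := by
  intro l
  induction l with
  | nil => intro z iv h; simp
  | cons c rest ih =>
    intro z iv h
    have hc : c = '0' := h c (List.mem_cons_self ..)
    subst hc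
    have hstep : pvStep (z, iv) '0' = (z + 1, iv) := by simp [pvStep]
    rw [List.foldl_cons, hstep, ih (z + 1) iv (fun c hc => h c (List.mem_cons_of_mem _ hc))]
    simp; push_cast; ring

lemma pvFold_lt : ∀ (l : List Char) (z : Int) (iv : List Int),
    0 ≤ z → (∃ c ∈ l, c ≠ '0') → (l.foldl pvStep (z, iv)).1 < z + l.length := by
  intro l
  induction l with
  | nil => intro z iv hz h; simp at h
  | cons c rest ih =>
    intro z iv hz h
    have hbound : ∀ (z' : Int) (iv' : List Int), 0 ≤ z' → (rest.foldl pvStep (z', iv')).1 ≤ z' + rest.length := by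
      intro z' iv' hz'
      by_cases hall : ∀ c ∈ rest, c = '0'
      · rw [pvFold_all_zeros rest z' iv' hall]
      · push_neg at hall
        exact le_of_lt (ih z' iv' hz' hall)
    by_cases hc1 : c = '1'
    · subst hc1
      have hstep : pvStep (z, iv) '1' = (0, iv ++ [z]) := by simp [pvStep]
      rw [List.foldl_cons, hstep]
      have := hbound 0 (iv ++ [z]) le_rfl
      simp only [List.length_cons]
      push_cast
      omega
    · by_cases hc0 : c = '0'
      · subst hc0
        have hstep : pvStep (z, iv) '0' = (z + 1, iv) := by simp [pvStep]
        rw [List.foldl_cons, hstep]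
        rcases h with ⟨d, hd, hd0⟩
        rcases List.mem_cons.mp hd with h | h
        · exact absurd h hd0
        · have := ih (z + 1) iv (by omega) ⟨d, h, hd0⟩
          simp only [List.length_cons]
          push_cast
          omega
      · have hstep : pvStep (z, iv) c = (z, iv) := by simp [pvStep, hc0, hc1]
        rw [List.foldl_cons, hstep]
        have := hbound z iv hz
        simp only [List.length_cons]
        push_cast
        omega

lemma pvFold_split : ∀ (l : List Char) (z : Int) (iv : List Int),
    l.foldl pvStep (z, iv) =
      match pvSplit l [] [] with
      | [] => (z, iv)
      | [p] => (z + pvC0 p, iv)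
      | p0 :: ps => (pvC0 (ps.getLastD []), iv ++ (z + pvC0 p0) :: ps.dropLast.map pvC0) := by
  intro l
  induction l with
  | nil => intro z iv; simp [pvSplit, pvC0]
  | cons c rest ih =>
    intro z iv
    have hlen := pvSplit_length rest [] []
    by_cases hc : c = '1'
    · subst hc
      have hstep : pvStep (z, iv) '1' = (0, iv ++ [z]) := by simp [pvStep]
      rw [List.foldl_cons, hstep, ih 0 (iv ++ [z])]
      have hsp : pvSplit ('1' :: rest) [] [] = [] :: pvSplit rest [] [] := by
        simp only [pvSplit, if_pos rfl]
        rw [pvSplit_acc rest [] [List.reverse []]]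
        simp
      rw [hsp]
      rcases hM : pvSplit rest [] [] with _ | ⟨p0, ps⟩
      · rw [hM] at hlen; omega
      · rcases ps with _ | ⟨q, qs⟩
        · simp [pvC0]
        · simp [pvC0]
    · have hstep : pvStep (z, iv) c = ((if c = '0' then z + 1 else z), iv) := by
        simp [pvStep, hc]
      rw [List.foldl_cons, hstep, ih (if c = '0' then z + 1 else z) iv]
      have hsp : pvSplit (c :: rest) [] [] = pvConsHead [c] (pvSplit rest [] []) := by
        simp only [pvSplit, if_neg hc]
        rw [pvSplit_cur rest [c]]
        rfl
      rw [hsp]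
      have hc0cons : ∀ p : List Char, pvC0 (c :: p) = (if c = '0' then (1:Int) else 0) + pvC0 p := by
        intro p
        by_cases h0 : c = '0' <;> simp [pvC0, List.count_cons, h0] <;> ring
      rcases hM : pvSplit rest [] [] with _ | ⟨p0, ps⟩
      · rw [hM] at hlen; omega
      · rcases ps with _ | ⟨q, qs⟩
        · simp only [pvConsHead]
          have hcp : ([c] ++ p0) = c :: p0 := rfl
          rw [hcp]
          simp only [hc0cons p0]
          by_cases h0 : c = '0' <;> simp [h0] <;> ring
        · simp only [pvConsHead]
          have hcp : ([c] ++ p0) = c :: p0 := rfl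
          rw [hcp]
          simp only [hc0cons p0]
          by_cases h0 : c = '0' <;> simp [h0] <;> ring_nf

-- ===== VERDICT (by name: the statement is the Claim_ definition above) =====
theorem count_intervals_spec : Claim_equal_count_intervals := by
  intro s _hdom hpre
  unfold Spec_count_intervals count_intervals count_intervals_alt
  simp only []
  by_cases hall : ∀ c ∈ s.toList, c = '0'
  · -- the all-'0' (or empty) string: A's guard fires with intervs = [], B's guard fires
    rw [pvFold_all_zeros s.toList 0 [] hall]
    have hcount : PySem.Chars.count s.toList ['0'] = s.toList.length := by
      rw [pvCount_single]
      exact List.count_eq_length.mpr (fun b hb => (hall b hb).symm)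
    simp [hcount]
  · -- some non-'0' character: neither guard fires, and Pre_ gives a '1' in the string
    have hex : ∃ c ∈ s.toList, c ≠ '0' := by
      push_neg at hall; exact hall
    have h1 : '1' ∈ s.toList := by
      rcases hpre with h | ⟨h, _, _⟩
      · exfalso
        rcases hex with ⟨d, hd, hd0⟩
        exact hd0 (by simpa using (List.all_eq_true.mp h) d hd)
      · exact h
    have hlt := pvFold_lt s.toList 0 [] le_rfl hex
    have hgA : ¬ ((s.toList.foldl pvStep (0, [])).1 = (PySem.Chars.len s.toList : Int)) := by
      simp only [PySem.Chars.len_eq]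
      omega
    have hgB : ¬ (PySem.Chars.count s.toList ['0'] = PySem.Chars.len s.toList) := by
      intro hEq
      have hEq' : List.count '0' s.toList = s.toList.length := by
        rw [pvCount_single] at hEq
        simpa [PySem.Chars.len_eq] using hEq
      rcases hex with ⟨d, hd, hd0⟩
      exact hd0 ((List.count_eq_length.mp hEq' d hd).symm)
    have hlen := pvSplit_length s.toList [] []
    have hc1 : 0 < s.toList.count '1' := List.count_pos_iff.mpr h1
    have hfold := pvFold_split s.toList 0 []
    rcases hM : pvSplit s.toList [] [] with _ | ⟨p0, ps⟩
    · rw [hM] at hlen; simp at hlen; omega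
    rcases ps with _ | ⟨q, qs⟩
    · rw [hM] at hlen; simp at hlen; omega
    rw [hM] at hfold
    simp only [List.nil_append] at hfold
    rw [pvSplitOn_eq, hM, if_neg hgB, if_neg hgA, hfold]
    simp only [List.dropLast_cons₂, List.map_cons, List.getLastD_cons, pvCount_single, pvC0,
      zero_add]
    rfl
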